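-- pv_equiv track=rewrite | github.com/mossprescott/pynand | nand/integration.py | collapse_internal
-- ===== SOURCE A (Python) =====
-- def collapse_internal(graph):
--     """Collapse _all_ paths, removing _every_ internal node.
--     """
--
--     result = graph.copy()
--
--     to_delete = []
--     for src, dst in graph.items():
--         while dst in result:
--             previous_dst = result[dst]
--             result[src] = previous_dst
--             to_delete.append(dst)
--             dst = previous_dst
--
--     for node in to_delete:
--         if node in result:
--             del result[node]
--
--     return result
-- ===== SOURCE B (Python) =====
-- def collapse_internal(graph):
--     """Collapse _all_ paths, removing _every_ internal node.
--
--     Memoized terminal resolution: each pointer chain is walked once; the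
--     internal nodes (keys that are targets of some edge) are dropped up front.
--     """
--     internal = {dst for dst in graph.values() if dst in graph}
--     terminal = {}
--
--     def resolve(d):
--         path = []
--         while d in graph and d not in terminal:
--             path.append(d)
--             d = graph[d]
--         t = terminal[d] if d in terminal else d
--         for node in path:
--             terminal[node] = t
--         return t
--
--     return {src: resolve(dst) for src, dst in graph.items() if src not in internal}
-- ===== Notes on version B (the rewrite author's own statement) =====
-- stated objective: alternative
-- what changed: A repeatedly re-walks pointer chains while mutating a copy of the dict and deleting marked nodes afterwards; B walks every chain once with a memoized terminal table (path compression), precomputes the set of internal nodes, and builds the output dict directly (fewer chain steps asymptotically, but a larger constant overhead per node).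
-- outside the precondition, e.g. on collapse_internal({1: 1}): A does not finish within the time limit, B returns {}
import Mathlib
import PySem

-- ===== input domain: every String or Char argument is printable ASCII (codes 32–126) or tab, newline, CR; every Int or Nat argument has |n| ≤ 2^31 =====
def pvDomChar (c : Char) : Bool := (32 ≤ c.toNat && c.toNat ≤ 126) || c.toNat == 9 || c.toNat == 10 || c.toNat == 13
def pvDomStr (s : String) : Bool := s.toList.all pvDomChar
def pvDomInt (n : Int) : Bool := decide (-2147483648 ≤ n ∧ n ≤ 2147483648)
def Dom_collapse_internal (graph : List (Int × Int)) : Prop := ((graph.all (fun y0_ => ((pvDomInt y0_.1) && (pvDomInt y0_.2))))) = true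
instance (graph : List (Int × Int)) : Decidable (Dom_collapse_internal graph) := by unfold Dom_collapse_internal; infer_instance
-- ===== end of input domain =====

-- B replaces A's in-place chain compression (re-walking partially compressed chains in a mutated
-- copy, deleting marked nodes afterwards) by a memoized terminal resolution: each chain is walked
-- once, internal nodes are computed up front, and the output dict is built directly (alternative).


-- ===== PORT A =====
-- the inner 'while dst in result' loop, as fuel recursion (Pre_ guarantees the chains are acyclic,
-- under which fuel graph.length + 1 is never exhausted)
def awalk (fuel : Nat) (result : PySem.Dict Int Int) (td : List Int) (src dst : Int) :
    PySem.Dict Int Int × List Int :=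
  match fuel with
  | 0 => (result, td)
  | fuel + 1 =>
    match result.get? dst with
    | none => (result, td)
    | some prev => awalk fuel (result.insert src prev) (td ++ [dst]) src prev

def collapse_internal (graph : List (Int × Int)) : List (Int × Int) :=
  let st := graph.foldl
    (fun (st : PySem.Dict Int Int × List Int) p => awalk (graph.length + 1) st.1 st.2 p.1 p.2)
    (PySem.Dict.mk graph, [])
  (st.2.foldl (fun r node => if r.contains node then r.erase node else r) st.1).items

-- ===== PORT B =====
-- the 'while d in graph and d not in terminal' loop of resolve, as fuel recursion
def bwalk (fuel : Nat) (g term : PySem.Dict Int Int) (d : Int) (path : List Int) :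
    Int × List Int :=
  match fuel with
  | 0 => (d, path)
  | fuel + 1 =>
    if g.contains d && !(term.contains d) then
      bwalk fuel g term (g.getD d d) (path ++ [d])
    else (d, path)

def bresolve (fuel : Nat) (g term : PySem.Dict Int Int) (d : Int) :
    Int × PySem.Dict Int Int :=
  let w := bwalk fuel g term d []
  let t := if term.contains w.1 then term.getD w.1 w.1 else w.1
  (t, w.2.foldl (fun tm node => tm.insert node t) term)

def collapse_internal_alt (graph : List (Int × Int)) : List (Int × Int) :=
  let g := PySem.Dict.mk graph
  let internal : PySem.Set Int := PySem.Set.ofList (g.values.filter (fun v => g.contains v))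
  let st := graph.foldl
    (fun (st : PySem.Dict Int Int × PySem.Dict Int Int) p =>
      if internal.contains p.1 then st
      else
        let r := bresolve (graph.length + 1) g st.2 p.2
        (st.1.insert p.1 r.1, r.2))
    (PySem.Dict.empty, PySem.Dict.empty)
  st.1.items

-- ===== PRECONDITION & SPEC =====
-- j-fold iteration of the pointer map: follow the chain while the node is a key
def pvIter (g : PySem.Dict Int Int) : Nat → Int → Int
  | 0, d => d
  | n + 1, d => match g.get? d with | none => d | some v => pvIter g n v

-- Pre_ excludes (a) lists with duplicate keys, on which the Lean assoc-list reading and Python's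
-- dict construction (last value wins) disagree — an accident of the dict encoding — and
-- (b) graphs with a cyclic pointer chain, on which Python A's while loop never terminates.
def Pre_collapse_internal (graph : List (Int × Int)) : Prop :=
  (graph.map Prod.fst).Nodup ∧
  ∀ p ∈ graph,
    (PySem.Dict.mk graph).get? (pvIter (PySem.Dict.mk graph) graph.length p.2) = none

instance (graph : List (Int × Int)) : Decidable (Pre_collapse_internal graph) := by
  unfold Pre_collapse_internal; infer_instance

def pvWitness_collapse_internal : (List (Int × Int)) := ([(1, 2), (2, 7), (5, 1)])

def Spec_collapse_internal (graph : List (Int × Int)) (out : List (Int × Int)) : Prop :=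
  out = collapse_internal_alt graph
instance (graph : List (Int × Int)) (out : List (Int × Int)) :
    Decidable (Spec_collapse_internal graph out) := by unfold Spec_collapse_internal; infer_instance

-- ===== CLAIM (what is proved, stated in full; the proofs are below) =====
def Claim_equal_collapse_internal : Prop :=
  ∀ (graph : List (Int × Int)), Dom_collapse_internal graph →
    Pre_collapse_internal graph → Spec_collapse_internal graph (collapse_internal graph)

-- ===== LEMMAS AND PROOFS =====

theorem pvIter_fix (g : PySem.Dict Int Int) (d : Int) (h : g.get? d = none) (n : Nat) :
    pvIter g n d = d := by
  cases n <;> simp [pvIter, h]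

theorem pvIter_add (g : PySem.Dict Int Int) (a b : Nat) (d : Int) :
    pvIter g (a + b) d = pvIter g b (pvIter g a d) := by
  induction a generalizing d with
  | zero => simp [pvIter]
  | succ a ih =>
    have : a + 1 + b = (a + b) + 1 := by omega
    rw [this]
    cases h : g.get? d with
    | none => simp [pvIter, h, pvIter_fix g d h]
    | some v => simp [pvIter, h, ih]

theorem pvIter_esc_unique (g : PySem.Dict Int Int) (a b : Nat) (d : Int)
    (ha : g.get? (pvIter g a d) = none) (hb : g.get? (pvIter g b d) = none) :
    pvIter g a d = pvIter g b d := by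
  rcases Nat.le_total a b with h | h
  · have : b = a + (b - a) := by omega
    rw [this, pvIter_add, pvIter_fix _ _ ha]
  · have : a = b + (a - b) := by omega
    rw [this, pvIter_add, pvIter_fix _ _ hb]

theorem reach_val (g : PySem.Dict Int Int) :
    ∀ (j : Nat) (d : Int), g.get? (pvIter g (j + 1) d) ≠ none →
      ∃ s, g.get? s = some (pvIter g (j + 1) d) := by
  intro j
  induction j with
  | zero =>
    intro d hne
    cases h : g.get? d with
    | none => rw [pvIter_fix g d h] at hne; exact absurd h hne
    | some v => exact ⟨d, by simp [pvIter, h]⟩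
  | succ j ih =>
    intro d hne
    cases h : g.get? d with
    | none => rw [pvIter_fix g d h] at hne; exact absurd h hne
    | some v =>
      have e : pvIter g (j + 2) d = pvIter g (j + 1) v := by simp [pvIter, h]
      rw [e] at hne ⊢
      exact ih v hne

theorem escAll (g : PySem.Dict Int Int) (N : Nat)
    (H2 : ∀ k v, g.get? k = some v → g.get? (pvIter g N v) = none) :
    ∀ d, g.get? (pvIter g (N + 1) d) = none := by
  intro d
  cases h : g.get? d with
  | none => rw [pvIter_fix g d h]; exact h
  | some v =>
    have e : pvIter g (N + 1) d = pvIter g N v := by simp [pvIter, h]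
    rw [e]; exact H2 d v h

theorem T_some (g : PySem.Dict Int Int) (N : Nat)
    (hesc : ∀ d, g.get? (pvIter g (N + 1) d) = none)
    {d v : Int} (h : g.get? d = some v) :
    pvIter g (N + 1) d = pvIter g (N + 1) v := by
  have e : pvIter g (N + 1 + 1) d = pvIter g (N + 1) v := by simp [pvIter, h]
  rw [← e]
  exact pvIter_esc_unique g (N + 1) (N + 1 + 1) d (hesc d) (by rw [e]; exact hesc v)

theorem T_iter (g : PySem.Dict Int Int) (N : Nat)
    (hesc : ∀ d, g.get? (pvIter g (N + 1) d) = none) (j : Nat) (d : Int) :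
    pvIter g (N + 1) (pvIter g j d) = pvIter g (N + 1) d := by
  rw [← pvIter_add]
  exact pvIter_esc_unique g (j + (N + 1)) (N + 1) d (by rw [pvIter_add]; exact hesc _) (hesc d)

theorem keys_get?_none {g r : PySem.Dict Int Int} (hkeys : r.keys = g.keys) (x : Int) :
    r.get? x = none ↔ g.get? x = none := by
  rw [PySem.Dict.get?_eq_none_iff_not_mem_keys, PySem.Dict.get?_eq_none_iff_not_mem_keys, hkeys]

theorem awalk_spec (g : PySem.Dict Int Int) (N : Nat)
    (hesc : ∀ d, g.get? (pvIter g (N + 1) d) = none) :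
    ∀ (fuel : Nat) (r : PySem.Dict Int Int) (td : List Int) (src d : Int) (m : Nat),
    r.keys = g.keys →
    (∀ k v, r.get? k = some v → ∃ j, 1 ≤ j ∧ v = pvIter g j k) →
    g.get? (pvIter g m d) = none → m < fuel →
    (∃ j0, 1 ≤ j0 ∧ d = pvIter g j0 src) →
    (g.get? d = none → awalk fuel r td src d = (r, td)) ∧
    (g.get? d ≠ none → ∃ marks,
      awalk fuel r td src d = (r.insert src (pvIter g (N + 1) d), td ++ marks) ∧
      (∀ x ∈ marks, g.get? x ≠ none ∧ ∃ s, g.get? s = some x) ∧ d ∈ marks) := by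
  intro fuel
  induction fuel with
  | zero => intro _ _ _ _ m _ _ _ hmf _; omega
  | succ fuel ih =>
    intro r td src d m hkeys hrv hm hmf hsrc
    cases h : r.get? d with
    | none =>
      have hgd : g.get? d = none := (keys_get?_none hkeys d).mp h
      constructor
      · intro _; simp [awalk, h]
      · intro hne; exact absurd hgd hne
    | some prev =>
      have hgd : g.get? d ≠ none := by
        intro hn
        rw [← keys_get?_none hkeys d] at hn
        simp [h] at hn
      constructor
      · intro hn; exact absurd hn hgd
      intro _
      -- d is a key; src is a key too
      obtain ⟨j0, hj0, hdj0⟩ := hsrc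
      have hsrcKey : g.get? src ≠ none := by
        intro hn
        have : d = src := by rw [hdj0, pvIter_fix g src hn]
        exact hgd (this ▸ hn)
      have hsrcC : r.contains src = true := by
        rw [PySem.Dict.contains_eq_isSome_get?]
        cases hrs : r.get? src with
        | none => exact absurd ((keys_get?_none hkeys src).mp hrs) hsrcKey
        | some _ => rfl
      obtain ⟨j, hj1, hjv⟩ := hrv d prev h
      have hm1 : 1 ≤ m := by
        rcases Nat.eq_zero_or_pos m with hz | hp
        · subst hz; simp [pvIter] at hm; exact absurd hm hgd
        · exact hp
      -- step to prev
      have step : awalk (fuel + 1) r td src d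
          = awalk fuel (r.insert src prev) (td ++ [d]) src prev := by
        simp [awalk, h]
      -- new m for prev
      have hmprev : ∃ m', g.get? (pvIter g m' prev) = none ∧ m' < fuel := by
        by_cases hjm : j ≤ m
        · refine ⟨m - j, ?_, by omega⟩
          rw [hjv, ← pvIter_add]
          have : j + (m - j) = m := by omega
          rw [this]; exact hm
        · refine ⟨0, ?_, by omega⟩
          have : prev = pvIter g m d := by
            rw [hjv]
            exact pvIter_esc_unique g j m d
              (by
                have : j = m + (j - m) := by omega
                rw [this, pvIter_add, pvIter_fix _ _ hm]; exact hm) hm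
          simpa [pvIter] using this ▸ hm
      obtain ⟨m', hm', hm'f⟩ := hmprev
      have hkeys' : (r.insert src prev).keys = g.keys := by
        rw [PySem.Dict.keys_insert_of_contains r prev hsrcC]; exact hkeys
      have hrv' : ∀ k v, (r.insert src prev).get? k = some v → ∃ j, 1 ≤ j ∧ v = pvIter g j k := by
        intro k v hkv
        rw [PySem.Dict.get?_insert] at hkv
        split at hkv
        · rename_i hk; cases hkv
          refine ⟨j0 + j, by omega, ?_⟩
          rw [hjv, hdj0, ← pvIter_add, hk]
        · exact hrv k v hkv
      have hsrc' : ∃ j', 1 ≤ j' ∧ prev = pvIter g j' src := by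
        refine ⟨j0 + j, by omega, ?_⟩
        rw [hjv, hdj0, ← pvIter_add]
      have IH := ih (r.insert src prev) (td ++ [d]) src prev m' hkeys' hrv' hm' hm'f hsrc'
      have hdval : ∃ s, g.get? s = some d := by
        have : d = pvIter g ((j0 - 1) + 1) src := by
          rw [hdj0]; congr 1; omega
        rw [this] at hgd ⊢
        exact reach_val g (j0 - 1) src hgd
      cases hprev : g.get? prev with
      | none =>
        obtain ⟨heq, -⟩ := IH
        refine ⟨[d], ?_, ?_, by simp⟩
        · rw [step, heq hprev]
          have : prev = pvIter g (N + 1) d := by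
            rw [hjv]
            exact pvIter_esc_unique g j (N + 1) d (hjv ▸ hprev) (hesc d)
          rw [this]
        · intro x hx; simp at hx; subst hx; exact ⟨hgd, hdval⟩
      | some w =>
        obtain ⟨-, hsome⟩ := IH
        obtain ⟨marks, heq, hmarks, hmem⟩ := hsome (by simp [hprev])
        refine ⟨d :: marks, ?_, ?_, by simp⟩
        · rw [step, heq, PySem.Dict.insert_insert_self]
          have : pvIter g (N + 1) prev = pvIter g (N + 1) d := by
            rw [hjv]; exact T_iter g N hesc j d
          rw [this]
          simp
        · intro x hx
          rcases List.mem_cons.mp hx with hx | hx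
          · subst hx; exact ⟨hgd, hdval⟩
          · exact hmarks x hx

theorem aloop_spec (graph : List (Int × Int))
    (hnd : (graph.map Prod.fst).Nodup)
    (hesc : ∀ d, (PySem.Dict.mk graph).get? (pvIter (PySem.Dict.mk graph) (graph.length + 1) d) = none)
    (H2 : ∀ p ∈ graph, (PySem.Dict.mk graph).get? (pvIter (PySem.Dict.mk graph) graph.length p.2) = none) :
    ∀ (rest done : List (Int × Int)) (r : PySem.Dict Int Int) (td : List Int),
    graph = done ++ rest →
    r.keys = (PySem.Dict.mk graph).keys →
    (∀ k v, (PySem.Dict.mk graph).get? k = some v →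
      r.get? k = some (if k ∈ done.map Prod.fst then pvIter (PySem.Dict.mk graph) (graph.length + 1) v else v)) →
    (∀ x ∈ td, (PySem.Dict.mk graph).get? x ≠ none ∧ ∃ s, (PySem.Dict.mk graph).get? s = some x) →
    (∀ p ∈ done, (PySem.Dict.mk graph).get? p.2 ≠ none → p.2 ∈ td) →
    ((rest.foldl (fun st p => awalk (graph.length + 1) st.1 st.2 p.1 p.2) (r, td)).1.keys
        = (PySem.Dict.mk graph).keys) ∧
    (∀ k v, (PySem.Dict.mk graph).get? k = some v →
      (rest.foldl (fun st p => awalk (graph.length + 1) st.1 st.2 p.1 p.2) (r, td)).1.get? k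
        = some (pvIter (PySem.Dict.mk graph) (graph.length + 1) v)) ∧
    (∀ x, x ∈ (rest.foldl (fun st p => awalk (graph.length + 1) st.1 st.2 p.1 p.2) (r, td)).2
      ↔ ((PySem.Dict.mk graph).get? x ≠ none ∧ ∃ s, (PySem.Dict.mk graph).get? s = some x)) := by
  intro rest
  induction rest with
  | nil =>
    intro done r td hsplit hkeys hval htd1 htd2
    simp only [List.foldl_nil]
    refine ⟨hkeys, ?_, ?_⟩
    · intro k v hkv
      have hk : k ∈ done.map Prod.fst := by
        have : (k, v) ∈ graph := PySem.Dict.mem_items_of_get?_eq_some _ hkv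
        rw [hsplit, List.append_nil] at this
        exact List.mem_map.mpr ⟨(k, v), this, rfl⟩
      simpa [hk] using hval k v hkv
    · intro x
      constructor
      · exact htd1 x
      · rintro ⟨hxk, s, hs⟩
        have : (s, x) ∈ graph := PySem.Dict.mem_items_of_get?_eq_some _ hs
        rw [hsplit, List.append_nil] at this
        exact htd2 (s, x) this hxk
  | cons p rest ih =>
    intro done r td hsplit hkeys hval htd1 htd2
    have hgnd : (PySem.Dict.mk graph).keys.Nodup := by
      simpa [PySem.Dict.keys_mk] using hnd
    have hpg : p ∈ graph := by rw [hsplit]; simp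
    have hp1 : (PySem.Dict.mk graph).get? p.1 = some p.2 :=
      PySem.Dict.get?_of_mem_items _ hpg hgnd
    have hp1done : p.1 ∉ done.map Prod.fst := by
      intro hmem
      have hc := hnd
      rw [hsplit] at hc
      simp only [List.map_append, List.map_cons, List.nodup_append] at hc
      exact hc.2.2 p.1 hmem p.1 (by simp) rfl
    have hwalk := awalk_spec (PySem.Dict.mk graph) graph.length hesc (graph.length + 1)
      r td p.1 p.2 graph.length hkeys
      (by
        intro k v hkv
        have hgk : (PySem.Dict.mk graph).get? k ≠ none := by
          intro hn
          rw [← keys_get?_none hkeys k] at hn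
          simp [hkv] at hn
        cases hk : (PySem.Dict.mk graph).get? k with
        | none => exact absurd hk hgk
        | some w =>
          have hv : v = (if k ∈ done.map Prod.fst
              then pvIter (PySem.Dict.mk graph) (graph.length + 1) w else w) := by
            have := hval k w hk
            rw [hkv] at this
            exact Option.some.inj this
          have h1 : pvIter (PySem.Dict.mk graph) 1 k = w := by simp [pvIter, hk]
          split at hv
          · exact ⟨1 + (graph.length + 1), by omega, by rw [pvIter_add, h1]; exact hv⟩
          · exact ⟨1, le_refl _, by rw [h1]; exact hv⟩)
      (H2 p hpg) (by omega)
      ⟨1, le_refl _, by simp [pvIter, hp1]⟩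
    obtain ⟨hnone, hsome⟩ := hwalk
    cases hp2 : (PySem.Dict.mk graph).get? p.2 with
    | none =>
      simp only [List.foldl_cons]
      rw [hnone hp2]
      refine ih (done ++ [p]) r td (by rw [hsplit]; simp) hkeys ?_ htd1 ?_
      · intro k v hkv
        by_cases hk : k = p.1
        · subst hk
          have hvp : v = p.2 := by
            rw [hp1] at hkv; exact (Option.some.inj hkv).symm
          subst hvp
          have hfix : pvIter (PySem.Dict.mk graph) (graph.length + 1) p.2 = p.2 :=
            pvIter_fix _ _ hp2 _
          have hthis := hval p.1 p.2 hkv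
          rw [if_neg hp1done] at hthis
          have hm' : p.1 ∈ (done ++ [p]).map Prod.fst := by simp
          rw [if_pos hm', hfix]
          exact hthis
        · by_cases hm : k ∈ done.map Prod.fst
          · have hm' : k ∈ (done ++ [p]).map Prod.fst := by simp [hm]
            rw [if_pos hm']
            have hthis := hval k v hkv
            rw [if_pos hm] at hthis
            exact hthis
          · have hm' : k ∉ (done ++ [p]).map Prod.fst := by simp [hm, hk]
            rw [if_neg hm']
            have hthis := hval k v hkv
            rw [if_neg hm] at hthis
            exact hthis
      · rintro q hq
        rcases List.mem_append.mp hq with hq | hq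
        · exact htd2 q hq
        · simp at hq; subst hq
          intro hne; exact absurd hp2 hne
    | some w =>
      obtain ⟨marks, heq, hmarks, hmem⟩ := hsome (by simp [hp2])
      simp only [List.foldl_cons]
      rw [heq]
      have hcont : (PySem.Dict.mk graph).contains p.1 = true := by
        rw [PySem.Dict.contains_eq_isSome_get?, hp1]; rfl
      have hcontr : r.contains p.1 = true := by
        rw [PySem.Dict.contains_eq_isSome_get?]
        cases hrs : r.get? p.1 with
        | none =>
          have := (keys_get?_none hkeys p.1).mp hrs
          rw [hp1] at this; cases this
        | some _ => rfl
      refine ih (done ++ [p]) _ _ (by rw [hsplit]; simp) ?_ ?_ ?_ ?_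
      · rw [PySem.Dict.keys_insert_of_contains r _ hcontr]; exact hkeys
      · intro k v hkv
        rw [PySem.Dict.get?_insert]
        by_cases hk : k = p.1
        · subst hk
          have hvp : v = p.2 := by
            rw [hp1] at hkv; exact (Option.some.inj hkv).symm
          subst hvp
          simp
        · rw [if_neg hk]
          by_cases hm : k ∈ done.map Prod.fst
          · have hm' : k ∈ (done ++ [p]).map Prod.fst := by simp [hm]
            rw [if_pos hm']
            have hthis := hval k v hkv
            rw [if_pos hm] at hthis
            exact hthis
          · have hm' : k ∉ (done ++ [p]).map Prod.fst := by simp [hm, hk]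
            rw [if_neg hm']
            have hthis := hval k v hkv
            rw [if_neg hm] at hthis
            exact hthis
      · intro x hx
        rcases List.mem_append.mp hx with hx | hx
        · exact htd1 x hx
        · exact hmarks x hx
      · rintro q hq
        rcases List.mem_append.mp hq with hq | hq
        · intro hne; exact List.mem_append.mpr (Or.inl (htd2 q hq hne))
        · simp at hq; subst hq
          intro _; exact List.mem_append.mpr (Or.inr hmem)

theorem erase_fold_items :
    ∀ (td : List Int) (r : PySem.Dict Int Int),
    (td.foldl (fun r node => if r.contains node then r.erase node else r) r).items
      = r.items.filter (fun p => !td.contains p.1) := by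
  intro td
  induction td with
  | nil => intro r; simp
  | cons t td ih =>
    intro r
    have hstep : ((if r.contains t then r.erase t else r) : PySem.Dict Int Int).items
        = r.items.filter (fun p => !(p.1 == t)) := by
      by_cases hc : r.contains t
      · simp [hc, PySem.Dict.erase]
      · rw [if_neg hc]
        have hall : ∀ p ∈ r.items, (!(p.1 == t)) = true := by
          intro p hp
          have : (p.1 == t) = false := by
            by_contra hne
            have : (p.1 == t) = true := by
              cases h : (p.1 == t) <;> simp_all
            exact hc (List.any_eq_true.mpr ⟨p, hp, this⟩)
          simp [this]
        exact (List.filter_eq_self.mpr hall).symm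
    rw [List.foldl_cons, ih, hstep, List.filter_filter]
    apply List.filter_congr
    intro p _
    show (!td.contains p.1 && !(p.1 == t)) = (!(t :: td).contains p.1)
    rw [List.contains_cons, Bool.not_or, Bool.and_comm]

theorem a_char (graph : List (Int × Int))
    (hnd : (graph.map Prod.fst).Nodup)
    (hesc : ∀ d, (PySem.Dict.mk graph).get? (pvIter (PySem.Dict.mk graph) (graph.length + 1) d) = none)
    (H2 : ∀ p ∈ graph, (PySem.Dict.mk graph).get? (pvIter (PySem.Dict.mk graph) graph.length p.2) = none) :
    collapse_internal graph
      = (graph.filter (fun p =>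
          !(((PySem.Dict.mk graph).get? p.1).isSome && (PySem.Dict.mk graph).values.contains p.1))).map
          (fun p => (p.1, pvIter (PySem.Dict.mk graph) (graph.length + 1) p.2)) := by
  have hgnd : (PySem.Dict.mk graph).keys.Nodup := by
    simpa [PySem.Dict.keys_mk] using hnd
  obtain ⟨hkeys, hval, htd⟩ := aloop_spec graph hnd hesc H2 graph [] (PySem.Dict.mk graph) []
    (by simp) rfl
    (by intro k v hkv; simpa using hkv)
    (by intro x hx; cases hx)
    (by intro p hp; cases hp)
  set res := graph.foldl
    (fun (st : PySem.Dict Int Int × List Int) p => awalk (graph.length + 1) st.1 st.2 p.1 p.2)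
    (PySem.Dict.mk graph, []) with hres
  have hresnd : res.1.keys.Nodup := by rw [hkeys]; exact hgnd
  have hitems : res.1.items
      = graph.map (fun p => (p.1, pvIter (PySem.Dict.mk graph) (graph.length + 1) p.2)) := by
    rw [PySem.Dict.items_eq_map_keys res.1 hresnd 0, hkeys, PySem.Dict.keys_mk, List.map_map]
    apply List.map_congr_left
    intro p hp
    have hp1 : (PySem.Dict.mk graph).get? p.1 = some p.2 :=
      PySem.Dict.get?_of_mem_items _ hp hgnd
    have := hval p.1 p.2 hp1
    simp [PySem.Dict.getD_eq_get?_getD, this]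
  have : collapse_internal graph = res.1.items.filter (fun q => !res.2.contains q.1) := by
    rw [collapse_internal]
    rw [← hres]
    exact erase_fold_items res.2 res.1
  rw [this, hitems, List.filter_map]
  congr 1
  apply List.filter_congr
  intro p hp
  show (!res.2.contains p.1)
      = (!(((PySem.Dict.mk graph).get? p.1).isSome && (PySem.Dict.mk graph).values.contains p.1))
  congr 1
  rw [Bool.eq_iff_iff]
  rw [List.contains_iff_mem, htd p.1, Bool.and_eq_true, List.contains_iff_mem]
  constructor
  · rintro ⟨hne, s, hs⟩
    refine ⟨by cases h : (PySem.Dict.mk graph).get? p.1 <;> simp_all, ?_⟩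
    exact List.mem_map.mpr ⟨(s, p.1), PySem.Dict.mem_items_of_get?_eq_some _ hs, rfl⟩
  · rintro ⟨hsome, hv⟩
    refine ⟨by cases h : (PySem.Dict.mk graph).get? p.1 <;> simp_all, ?_⟩
    obtain ⟨q, hq, hq2⟩ := List.mem_map.mp hv
    exact ⟨q.1, by
      have : (q.1, p.1) ∈ (PySem.Dict.mk graph).items := by
        have : q = (q.1, q.2) := rfl
        rw [← hq2]; exact hq
      exact PySem.Dict.get?_of_mem_items _ this hgnd⟩

theorem bwalk_spec (g : PySem.Dict Int Int) (N : Nat)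
    (hesc : ∀ d, g.get? (pvIter g (N + 1) d) = none) :
    ∀ (fuel : Nat) (term : PySem.Dict Int Int) (d : Int) (path : List Int) (m : Nat),
    (∀ k v, term.get? k = some v → v = pvIter g (N + 1) k) →
    g.get? (pvIter g m d) = none → m < fuel →
    ∃ t0 newp, bwalk fuel g term d path = (t0, path ++ newp) ∧
      ((if term.contains t0 then term.getD t0 t0 else t0) = pvIter g (N + 1) d) ∧
      (∀ x ∈ newp, pvIter g (N + 1) x = pvIter g (N + 1) d) := by
  intro fuel
  induction fuel with
  | zero => intro _ _ _ m _ _ hmf; omega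
  | succ fuel ih =>
    intro term d path m hterm hm hmf
    cases hcond : (g.contains d && !(term.contains d)) with
    | false =>
      refine ⟨d, [], by simp [bwalk, hcond], ?_, by simp⟩
      by_cases ht : term.contains d = true
      · rw [if_pos ht]
        rw [PySem.Dict.contains_eq_isSome_get?] at ht
        cases hg : term.get? d with
        | none => rw [hg] at ht; cases ht
        | some v =>
          have hv := hterm d v hg
          rw [PySem.Dict.getD_eq_get?_getD, hg]
          exact hv
      · rw [if_neg ht]
        have hgc : g.contains d = false := by
          cases hgc : g.contains d
          · rfl
          · rw [hgc] at hcond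
            simp at hcond
            rw [PySem.Dict.contains_eq_isSome_get?] at ht hcond
            rw [hcond] at ht; cases ht rfl
        rw [PySem.Dict.contains_eq_isSome_get?] at hgc
        have hgn : g.get? d = none := by
          cases hg : g.get? d
          · rfl
          · rw [hg] at hgc; cases hgc
        rw [pvIter_fix g d hgn]
    | true =>
      have hgc : g.contains d = true := by
        cases h : g.contains d
        · rw [h] at hcond; simp at hcond
        · rfl
      have htc : term.contains d = false := by
        cases h : term.contains d
        · rfl
        · rw [h] at hcond; simp at hcond
      rw [PySem.Dict.contains_eq_isSome_get?] at hgc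
      cases hg : g.get? d with
      | none => rw [hg] at hgc; cases hgc
      | some v =>
      have hgetD : g.getD d d = v := by rw [PySem.Dict.getD_eq_get?_getD, hg]; rfl
      have hm1 : 1 ≤ m := by
        rcases Nat.eq_zero_or_pos m with hz | hp
        · subst hz; simp [pvIter] at hm; rw [hm] at hg; cases hg
        · exact hp
      have hm' : g.get? (pvIter g (m - 1) v) = none := by
        have e : pvIter g m d = pvIter g (m - 1) v := by
          have : m = (m - 1) + 1 := by omega
          rw [this]; simp [pvIter, hg]
        rw [← e]; exact hm
      obtain ⟨t0, newp, heq, ht, hx⟩ := ih term v (path ++ [d]) (m - 1) hterm hm' (by omega)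
      refine ⟨t0, d :: newp, ?_, ?_, ?_⟩
      · rw [bwalk, hcond]  -- hmm: unfold via simp
        rw [hgetD, heq]
        simp
      · rw [ht, T_some g N hesc hg]
      · intro x hxm
        rcases List.mem_cons.mp hxm with hxm | hxm
        · subst hxm; rfl
        · rw [hx x hxm, T_some g N hesc hg]

theorem term_fold_inv (g : PySem.Dict Int Int) (N : Nat) :
    ∀ (l : List Int) (term : PySem.Dict Int Int) (t : Int),
    (∀ k v, term.get? k = some v → v = pvIter g (N + 1) k) →
    (∀ x ∈ l, pvIter g (N + 1) x = t) →
    ∀ k v, (l.foldl (fun tm node => tm.insert node t) term).get? k = some v →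
      v = pvIter g (N + 1) k := by
  intro l
  induction l with
  | nil => intro term t hterm _; exact hterm
  | cons x l ih =>
    intro term t hterm hl
    rw [List.foldl_cons]
    refine ih (term.insert x t) t ?_ (fun y hy => hl y (List.mem_cons_of_mem x hy))
    intro k v hkv
    rw [PySem.Dict.get?_insert] at hkv
    split at hkv
    · rename_i hk; subst hk
      have h1 : t = v := Option.some.inj hkv
      rw [← h1]
      exact (hl k (by simp)).symm
    · exact hterm k v hkv

theorem bresolve_spec (g : PySem.Dict Int Int) (N : Nat)
    (hesc : ∀ d, g.get? (pvIter g (N + 1) d) = none)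
    (term : PySem.Dict Int Int) (d : Int) (m : Nat)
    (hterm : ∀ k v, term.get? k = some v → v = pvIter g (N + 1) k)
    (hm : g.get? (pvIter g m d) = none) (hmf : m < N + 1) :
    (bresolve (N + 1) g term d).1 = pvIter g (N + 1) d ∧
    (∀ k v, (bresolve (N + 1) g term d).2.get? k = some v → v = pvIter g (N + 1) k) := by
  obtain ⟨t0, newp, heq, ht, hx⟩ := bwalk_spec g N hesc (N + 1) term d [] m hterm hm hmf
  rw [List.nil_append] at heq
  constructor
  · show (let w := bwalk (N + 1) g term d [];
      let t := if term.contains w.1 then term.getD w.1 w.1 else w.1;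
      (t, w.2.foldl (fun tm node => tm.insert node t) term)).1 = _
    rw [heq]
    exact ht
  · show ∀ k v, (let w := bwalk (N + 1) g term d [];
      let t := if term.contains w.1 then term.getD w.1 w.1 else w.1;
      (t, w.2.foldl (fun tm node => tm.insert node t) term)).2.get? k = some v → _
    rw [heq]
    intro k v hkv
    exact term_fold_inv g N newp term _ hterm (fun x hxm => by rw [hx x hxm, ht]) k v hkv

theorem bloop_spec (graph : List (Int × Int))
    (hnd : (graph.map Prod.fst).Nodup)
    (hesc : ∀ d, (PySem.Dict.mk graph).get? (pvIter (PySem.Dict.mk graph) (graph.length + 1) d) = none)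
    (H2 : ∀ p ∈ graph, (PySem.Dict.mk graph).get? (pvIter (PySem.Dict.mk graph) graph.length p.2) = none) :
    ∀ (rest done : List (Int × Int)) (out term : PySem.Dict Int Int),
    graph = done ++ rest →
    (∀ k v, term.get? k = some v → v = pvIter (PySem.Dict.mk graph) (graph.length + 1) k) →
    out.items = (done.filter (fun p =>
        !((PySem.Set.ofList ((PySem.Dict.mk graph).values.filter
            (fun v => (PySem.Dict.mk graph).contains v)) : List Int).contains p.1))).map
        (fun p => (p.1, pvIter (PySem.Dict.mk graph) (graph.length + 1) p.2)) →
    (rest.foldl (fun (st : PySem.Dict Int Int × PySem.Dict Int Int) p =>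
        if (PySem.Set.ofList ((PySem.Dict.mk graph).values.filter
            (fun v => (PySem.Dict.mk graph).contains v)) : List Int).contains p.1 then st
        else
          let r := bresolve (graph.length + 1) (PySem.Dict.mk graph) st.2 p.2
          (st.1.insert p.1 r.1, r.2)) (out, term)).1.items
      = ((done ++ rest).filter (fun p =>
          !((PySem.Set.ofList ((PySem.Dict.mk graph).values.filter
              (fun v => (PySem.Dict.mk graph).contains v)) : List Int).contains p.1))).map
          (fun p => (p.1, pvIter (PySem.Dict.mk graph) (graph.length + 1) p.2)) := by
  intro rest
  induction rest with
  | nil =>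
    intro done out term hsplit hterm hout
    simpa using hout
  | cons p rest ih =>
    intro done out term hsplit hterm hout
    have hpg : p ∈ graph := by rw [hsplit]; simp
    rw [List.foldl_cons]
    cases hI : ((PySem.Set.ofList ((PySem.Dict.mk graph).values.filter
        (fun v => (PySem.Dict.mk graph).contains v)) : List Int).contains p.1) with
    | true =>
      simp only [hI, reduceIte]
      have hsing : List.filter (fun q =>
          !((PySem.Set.ofList ((PySem.Dict.mk graph).values.filter
              (fun v => (PySem.Dict.mk graph).contains v)) : List Int).contains q.1)) [p] = [] := by
        rw [List.filter_cons, hI]; simp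
      have := ih (done ++ [p]) out term (by rw [hsplit]; simp) hterm
        (by rw [hout, List.filter_append, hsing, List.append_nil])
      rw [this, List.append_assoc, List.singleton_append]
    | false =>
      simp only [hI, Bool.false_eq_true, reduceIte]
      obtain ⟨hval, hterm'⟩ := bresolve_spec (PySem.Dict.mk graph) graph.length hesc term p.2
        graph.length hterm (H2 p hpg) (by omega)
      have hp1done : p.1 ∉ done.map Prod.fst := by
        intro hmem
        have hc := hnd
        rw [hsplit] at hc
        simp only [List.map_append, List.map_cons, List.nodup_append] at hc
        exact hc.2.2 p.1 hmem p.1 (by simp) rfl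
      have hcout : out.contains p.1 = false := by
        cases hco : out.contains p.1
        · rfl
        · exfalso
          obtain ⟨q, hq, hq1⟩ := List.any_eq_true.mp hco
          have : p.1 ∈ done.map Prod.fst := by
            have hq' : q ∈ out.items := hq
            rw [hout] at hq'
            obtain ⟨q', hq'm, hq'e⟩ := List.mem_map.mp hq'
            have : q'.1 = p.1 := by
              have := eq_of_beq hq1
              rw [← hq'e] at this
              exact this
            exact this ▸ List.mem_map.mpr ⟨q', List.mem_of_mem_filter hq'm, rfl⟩
          exact hp1done this
      have := ih (done ++ [p])
        (out.insert p.1 (bresolve (graph.length + 1) (PySem.Dict.mk graph) term p.2).1)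
        (bresolve (graph.length + 1) (PySem.Dict.mk graph) term p.2).2
        (by rw [hsplit]; simp) hterm'
        (by
          have hsing : List.filter (fun q =>
              !((PySem.Set.ofList ((PySem.Dict.mk graph).values.filter
                  (fun v => (PySem.Dict.mk graph).contains v)) : List Int).contains q.1)) [p]
              = [p] := by
            rw [List.filter_cons, hI]; simp
          rw [PySem.Dict.items_insert_of_not_contains _ _ hcout, hout, hval,
            List.filter_append, hsing, List.map_append]
          simp)
      rw [this, List.append_assoc, List.singleton_append]

theorem b_char (graph : List (Int × Int))
    (hnd : (graph.map Prod.fst).Nodup)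
    (hesc : ∀ d, (PySem.Dict.mk graph).get? (pvIter (PySem.Dict.mk graph) (graph.length + 1) d) = none)
    (H2 : ∀ p ∈ graph, (PySem.Dict.mk graph).get? (pvIter (PySem.Dict.mk graph) graph.length p.2) = none) :
    collapse_internal_alt graph
      = (graph.filter (fun p =>
          !((PySem.Set.ofList ((PySem.Dict.mk graph).values.filter
              (fun v => (PySem.Dict.mk graph).contains v)) : List Int).contains p.1))).map
          (fun p => (p.1, pvIter (PySem.Dict.mk graph) (graph.length + 1) p.2)) := by
  have := bloop_spec graph hnd hesc H2 graph [] PySem.Dict.empty PySem.Dict.empty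
    (by simp)
    (by intro k v hkv; simp [PySem.Dict.get?, PySem.Dict.empty] at hkv)
    (by simp [PySem.Dict.empty])
  rw [collapse_internal_alt]
  simpa using this

theorem internal_bool_eq (graph : List (Int × Int)) (x : Int) :
    (!(((PySem.Dict.mk graph).get? x).isSome && (PySem.Dict.mk graph).values.contains x))
      = (!((PySem.Set.ofList ((PySem.Dict.mk graph).values.filter
          (fun v => (PySem.Dict.mk graph).contains v)) : List Int).contains x)) := by
  congr 1
  rw [Bool.eq_iff_iff, Bool.and_eq_true, List.contains_iff_mem,
    PySem.Set.contains_iff, PySem.Set.mem_ofList, List.mem_filter,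
    PySem.Dict.contains_eq_isSome_get?]
  constructor
  · rintro ⟨hs, hv⟩; exact ⟨hv, hs⟩
  · rintro ⟨hv, hs⟩; exact ⟨hs, hv⟩
-- ===== VERDICT (by name: the statement is the Claim_ definition above) =====
theorem collapse_internal_spec : Claim_equal_collapse_internal := by
  intro graph _ hpre
  unfold Spec_collapse_internal
  obtain ⟨hnd, hpre2⟩ := hpre
  have H2 : ∀ p ∈ graph,
      (PySem.Dict.mk graph).get? (pvIter (PySem.Dict.mk graph) graph.length p.2) = none := hpre2
  have hesc : ∀ d,
      (PySem.Dict.mk graph).get? (pvIter (PySem.Dict.mk graph) (graph.length + 1) d) = none := by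
    apply escAll
    intro k v hkv
    exact H2 (k, v) (PySem.Dict.mem_items_of_get?_eq_some _ hkv)
  rw [a_char graph hnd hesc H2, b_char graph hnd hesc H2, List.filter_congr
    (fun p _ => internal_bool_eq graph p.1)]
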